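-- pv_equiv track=rewrite | github.com/nicolasn59/Beecrowd | Python/AD-HOC/1140 Flowers Flourish from France.py | checkTautogram
-- ===== SOURCE A (Python) =====
-- def checkTautogram(letters):
--     letterFilter = []
--     for position in range(len(letters)):
--         if letters[position][0].lower() == letters[0][0].lower():
--             letterFilter.append('Y')
--         else:
--             letterFilter.append('N')
--     if 'N' in letterFilter:
--         return 'N'
--     else:
--         return 'Y'
-- ===== SOURCE B (Python) =====
-- def checkTautogram(letters):
--     firsts = {w[0].lower() for w in letters}
--     return 'Y' if len(firsts) <= 1 else 'N'
-- ===== Notes on version B (the rewrite author's own statement) =====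
-- stated objective: simpler
-- what changed: Collects the distinct lowercased first letters into a set and tests its size, instead of comparing every word with letters[0] and accumulating a list of Y/N flags that is then scanned for 'N'.
import Mathlib
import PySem

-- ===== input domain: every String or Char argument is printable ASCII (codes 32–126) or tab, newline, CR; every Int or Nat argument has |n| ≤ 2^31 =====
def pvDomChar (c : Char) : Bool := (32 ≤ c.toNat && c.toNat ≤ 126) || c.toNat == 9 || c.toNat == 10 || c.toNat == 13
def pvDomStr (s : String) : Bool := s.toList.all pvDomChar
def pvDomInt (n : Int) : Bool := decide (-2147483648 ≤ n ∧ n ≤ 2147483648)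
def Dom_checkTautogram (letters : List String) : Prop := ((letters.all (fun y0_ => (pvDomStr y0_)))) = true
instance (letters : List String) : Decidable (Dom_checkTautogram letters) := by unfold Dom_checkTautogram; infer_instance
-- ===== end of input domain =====

-- B replaces A's flag-list accumulation with a set of distinct lowercased first letters (simpler).

-- ===== PORT A =====
-- w[0].lower() : total form of the char access under Pre_ (w nonempty)
def pvFirstLower (w : String) : Char :=
  PySem.Chars.lowerChar ((PySem.Str.pyGet? w 0).getD ' ')

def checkTautogram (letters : List String) : String :=
  let letterFilter : List String :=
    (PySem.List.pyRange 0 letters.length 1).foldl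
      (fun acc position =>
        if pvFirstLower (PySem.List.pyGetD letters position "") =
           pvFirstLower (PySem.List.pyGetD letters 0 "") then
          acc ++ ["Y"]
        else
          acc ++ ["N"]) []
  if "N" ∈ letterFilter then "N" else "Y"

-- ===== PORT B =====
def checkTautogram_alt (letters : List String) : String :=
  let firsts : PySem.Set Char := PySem.Set.ofList (letters.map pvFirstLower)
  if PySem.Set.len firsts ≤ 1 then "Y" else "N"

-- ===== PRECONDITION & SPEC =====
-- Pre_ excludes lists containing an empty-string word, on which Python A raises IndexError at w[0].
def Pre_checkTautogram (letters : List String) : Prop := ∀ w ∈ letters, w ≠ ""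
instance (letters : List String) : Decidable (Pre_checkTautogram letters) := by unfold Pre_checkTautogram; infer_instance
def pvWitness_checkTautogram : List String := ["Foo", "fay", "Fee"]
def Spec_checkTautogram (letters : List String) (out : String) : Prop := out = checkTautogram_alt letters
instance (letters : List String) (out : String) : Decidable (Spec_checkTautogram letters out) := by unfold Spec_checkTautogram; infer_instance

-- ===== CLAIM (what is proved, stated in full; the proofs are below) =====
def Claim_equal_checkTautogram : Prop := ∀ (letters : List String), Dom_checkTautogram letters → Pre_checkTautogram letters → Spec_checkTautogram letters (checkTautogram letters)

-- ===== LEMMAS AND PROOFS =====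

-- A's letterFilter is a map over the words
theorem pvA_eq (letters : List String) :
    checkTautogram letters =
      if "N" ∈ letters.map (fun w => if pvFirstLower w = pvFirstLower (PySem.List.pyGetD letters 0 "") then "Y" else "N")
      then "N" else "Y" := by
  unfold checkTautogram
  rw [PySem.List.foldl_pyRange_zero_pyGetD' letters ""
        (fun acc w => if pvFirstLower w = pvFirstLower (PySem.List.pyGetD letters 0 "") then acc ++ ["Y"] else acc ++ ["N"]) []]
  rw [show (fun (acc : List String) w => if pvFirstLower w = pvFirstLower (PySem.List.pyGetD letters 0 "") then acc ++ ["Y"] else acc ++ ["N"])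
        = fun acc w => acc ++ [if pvFirstLower w = pvFirstLower (PySem.List.pyGetD letters 0 "") then "Y" else "N"] from by
    funext acc w; split <;> rfl]
  rw [PySem.List.foldl_append_singleton_eq_map]
  rfl

theorem pv_set_len_le_one (c : Char) (cs : List Char) :
    (PySem.Set.len (cs.foldl PySem.Set.add [c]) ≤ 1) ↔ (∀ x ∈ cs, x = c) := by
  induction cs with
  | nil => simp [PySem.Set.len]
  | cons x xs ih =>
    by_cases hx : x = c
    · subst hx
      simp only [List.foldl_cons]
      rw [show PySem.Set.add [x] x = [x] from by simp [PySem.Set.add, PySem.Set.contains]]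
      simp only [List.mem_cons]
      constructor
      · intro h y hy
        rcases hy with h1 | h2
        · exact h1
        · exact ih.mp h y h2
      · intro h; exact ih.mpr (fun y hy => h y (Or.inr hy))
    · have hadd : PySem.Set.add [c] x = [c, x] := by
        simp [PySem.Set.add, PySem.Set.contains, hx]
      simp only [List.foldl_cons, hadd]
      constructor
      · intro h
        exfalso
        have hmono : ∀ (l : List Char) (s : PySem.Set Char), s.length ≤ (l.foldl PySem.Set.add s).length := by
          intro l
          induction l with
          | nil => intro s; simp
          | cons z zs ihz =>
            intro s
            calc s.length ≤ (PySem.Set.add s z).length := by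
                  simp only [PySem.Set.add]; split <;> simp
              _ ≤ _ := ihz _
        have h2 := hmono xs [c, x]
        simp only [PySem.Set.len, List.length_cons, List.length_nil] at h h2
        omega
      · intro h; exact absurd (h x (by simp)) hx

theorem pvB_eq (h : String) (t : List String) :
    checkTautogram_alt (h :: t)
      = (if ∀ x ∈ t.map pvFirstLower, x = pvFirstLower h then "Y" else "N") := by
  unfold checkTautogram_alt
  simp only [List.map_cons]
  show (if PySem.Set.len (List.foldl PySem.Set.add [pvFirstLower h] (t.map pvFirstLower)) ≤ 1 then "Y" else "N") = _
  by_cases hc : ∀ x ∈ t.map pvFirstLower, x = pvFirstLower h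
  · rw [if_pos ((pv_set_len_le_one _ _).mpr hc), if_pos hc]
  · rw [if_neg (fun hle => hc ((pv_set_len_le_one _ _).mp hle)), if_neg hc]

-- ===== VERDICT (by name: the statement is the Claim_ definition above) =====
theorem checkTautogram_spec : Claim_equal_checkTautogram := by
  intro letters _hdom _hpre
  unfold Spec_checkTautogram
  rw [pvA_eq]
  cases letters with
  | nil => simp [checkTautogram_alt, PySem.Set.ofList, PySem.Set.len]
  | cons h t =>
    rw [pvB_eq h t]
    have h0 : PySem.List.pyGetD (h :: t) 0 "" = h := by
      simp [PySem.List.pyGetD_zero_cons]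
    rw [h0]
    by_cases hall : ∀ x ∈ t.map pvFirstLower, x = pvFirstLower h
    · rw [if_pos hall]
      have : "N" ∉ (h :: t).map (fun w => if pvFirstLower w = pvFirstLower h then "Y" else "N") := by
        simp only [List.mem_map, not_exists]
        rintro w ⟨hw, heq⟩
        rcases List.mem_cons.mp hw with rfl | hwt
        · simp at heq
        · rw [if_pos (hall _ (List.mem_map.mpr ⟨w, hwt, rfl⟩))] at heq
          exact absurd heq (by decide)
      rw [if_neg this]
    · rw [if_neg hall]
      have : "N" ∈ (h :: t).map (fun w => if pvFirstLower w = pvFirstLower h then "Y" else "N") := by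
        push Not at hall
        obtain ⟨x, hx, hne⟩ := hall
        obtain ⟨w, hwt, rfl⟩ := List.mem_map.mp hx
        exact List.mem_map.mpr ⟨w, List.mem_cons_of_mem _ hwt, by rw [if_neg hne]⟩
      rw [if_pos this]
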